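-- pv_equiv track=rewrite | github.com/mordechaipotash/intellectual-dna | pipelines/build_weekly_expertise.py | parse_expertise
-- ===== SOURCE A (Python) =====
-- def parse_expertise(text: str) -> list:
--     """Parse expertise signals from LLM output."""
--     expertise = []
--     lines = text.split('\n')
--
--     current = {}
--     for line in lines:
--         line = line.strip()
--         if line.startswith('TECH:'):
--             if current and 'tech' in current:
--                 expertise.append(current)
--             current = {'tech': line[5:].strip()}
--         elif line.startswith('EVIDENCE:') and current:
--             current['evidence'] = line[9:].strip()
--         elif line.startswith('CONFIDENCE:') and current:
--             current['confidence'] = line[11:].strip().lower()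
--
--     # Don't forget the last one
--     if current and 'tech' in current:
--         expertise.append(current)
--
--     return expertise
-- ===== SOURCE B (Python) =====
-- def parse_expertise(text: str) -> list:
--     """Parse expertise signals from LLM output.
--
--     Boundary-scan decomposition: strip all lines up front, then split the line
--     list into per-record blocks at the 'TECH:' lines (anything before the first
--     TECH line is ignored) and build each record from its own block.
--     """
--     lines = [ln.strip() for ln in text.split('\n')]
--     n = len(lines)
--     records = []
--     i = 0
--     while i < n:
--         head = lines[i]
--         i += 1
--         if not head.startswith('TECH:'):
--             continue
--         start = i
--         while i < n and not lines[i].startswith('TECH:'):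
--             i += 1
--         d = {'tech': head[5:].strip()}
--         for ln in lines[start:i]:
--             if ln.startswith('EVIDENCE:'):
--                 d['evidence'] = ln[9:].strip()
--             elif ln.startswith('CONFIDENCE:'):
--                 d['confidence'] = ln[11:].strip().lower()
--         records.append(d)
--     return records
-- ===== Notes on version B (the rewrite author's own statement) =====
-- stated objective: alternative
-- what changed: Replaces A's accumulate-and-flush loop over a running dict (with flush-on-next-TECH and a trailing flush) by a boundary scan: strip all lines first, cut the line list into per-record blocks at the TECH: lines, and build each record independently from its block.
import Mathlib
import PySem

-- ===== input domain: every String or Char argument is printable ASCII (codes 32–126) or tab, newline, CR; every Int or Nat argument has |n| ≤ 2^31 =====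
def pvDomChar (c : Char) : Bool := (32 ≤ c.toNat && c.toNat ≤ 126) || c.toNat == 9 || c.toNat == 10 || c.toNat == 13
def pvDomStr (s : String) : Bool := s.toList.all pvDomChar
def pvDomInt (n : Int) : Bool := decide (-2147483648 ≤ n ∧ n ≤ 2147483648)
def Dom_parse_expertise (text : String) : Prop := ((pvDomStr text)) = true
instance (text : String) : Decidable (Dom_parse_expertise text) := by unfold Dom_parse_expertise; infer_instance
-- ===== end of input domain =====

-- B replaces A's accumulate-and-flush loop (running dict, flush on next TECH and at the end) by a
-- boundary scan that cuts the stripped line list into per-record blocks at the TECH: lines and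
-- builds each record from its own block; same return value, stated as exact equivalence.


-- ===== PORT A =====
-- 'if current and "tech" in current'
def pa_flushCond (cur : PySem.Dict String String) : Bool := (cur.size != 0) && cur.contains "tech"

-- the loop body, after 'line = line.strip()'
def pa_body (st : List (List (String × String)) × PySem.Dict String String) (line : String) :
    List (List (String × String)) × PySem.Dict String String :=
  if PySem.Str.startswith line "TECH:" then
    ((if pa_flushCond st.2 then st.1 ++ [st.2.items] else st.1),
     PySem.Dict.empty.insert "tech" (PySem.Str.strip (PySem.Str.slice line (some 5) none)))
  else if PySem.Str.startswith line "EVIDENCE:" && (st.2.size != 0) then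
    (st.1, st.2.insert "evidence" (PySem.Str.strip (PySem.Str.slice line (some 9) none)))
  else if PySem.Str.startswith line "CONFIDENCE:" && (st.2.size != 0) then
    (st.1, st.2.insert "confidence" (PySem.Str.lower (PySem.Str.strip (PySem.Str.slice line (some 11) none))))
  else st

def parse_expertise (text : String) : List (List (String × String)) :=
  -- sep "\n" is a nonempty literal, so split? is always `some`; getD [] only totalizes
  let lines := (PySem.Str.split? text "\n").getD []
  let st := lines.foldl (fun st line => pa_body st (PySem.Str.strip line)) ([], PySem.Dict.empty)
  if pa_flushCond st.2 then st.1 ++ [st.2.items] else st.1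

-- ===== PORT B =====
def pb_notTech (l : String) : Bool := !PySem.Str.startswith l "TECH:"

def pb_addLine (d : PySem.Dict String String) (ln : String) : PySem.Dict String String :=
  if PySem.Str.startswith ln "EVIDENCE:" then
    d.insert "evidence" (PySem.Str.strip (PySem.Str.slice ln (some 9) none))
  else if PySem.Str.startswith ln "CONFIDENCE:" then
    d.insert "confidence" (PySem.Str.lower (PySem.Str.strip (PySem.Str.slice ln (some 11) none)))
  else d

def pb_record (head : String) (block : List String) : List (String × String) :=
  (block.foldl pb_addLine
    (PySem.Dict.empty.insert "tech" (PySem.Str.strip (PySem.Str.slice head (some 5) none)))).items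

-- Source B's outer index loop over the remaining lines, as recursion on the remaining-line list:
-- skip non-TECH lines; at a TECH line take its block (up to the next TECH line) and recurse on the rest
def pb_blocks : List String → List (List (String × String))
  | [] => []
  | head :: rest =>
    if PySem.Str.startswith head "TECH:" then
      pb_record head (rest.takeWhile pb_notTech) :: pb_blocks (rest.dropWhile pb_notTech)
    else pb_blocks rest
termination_by l => l.length
decreasing_by
  · simpa using Nat.lt_succ_of_le (List.length_dropWhile_le _ _)
  · simp

def parse_expertise_alt (text : String) : List (List (String × String)) :=
  pb_blocks (((PySem.Str.split? text "\n").getD []).map PySem.Str.strip)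

-- ===== PRECONDITION & SPEC =====
def Spec_parse_expertise (text : String) (out : List (List (String × String))) : Prop := out = parse_expertise_alt text
instance (text : String) (out : List (List (String × String))) : Decidable (Spec_parse_expertise text out) := by unfold Spec_parse_expertise; infer_instance

-- ===== CLAIM (what is proved, stated in full; the proofs are below) =====
def Claim_equal_parse_expertise : Prop := ∀ (text : String), Dom_parse_expertise text → Spec_parse_expertise text (parse_expertise text)

-- ===== LEMMAS AND PROOFS =====
def finA (st : List (List (String × String)) × PySem.Dict String String) : List (List (String × String)) :=
  if pa_flushCond st.2 then st.1 ++ [st.2.items] else st.1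

theorem size_ne_of_contains (d : PySem.Dict String String) (h : d.contains "tech" = true) :
    (d.size != 0) = true := by
  rcases d with ⟨items⟩
  cases items with
  | nil => simp [PySem.Dict.contains] at h
  | cons a t => simp [PySem.Dict.size]

theorem body_notTech (exp : List (List (String × String))) (d : PySem.Dict String String)
    (l : String) (h : PySem.Str.startswith l "TECH:" = false) (hs : (d.size != 0) = true) :
    pa_body (exp, d) l = (exp, pb_addLine d l) := by
  simp only [PySem.Str.startswith_eq, show ("TECH:".toList) = ['T','E','C','H',':'] from rfl] at h
  simp [pa_body, pb_addLine, h, hs]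
  split_ifs <;> rfl

theorem addLine_contains (d : PySem.Dict String String) (l : String)
    (hd : d.contains "tech" = true) : (pb_addLine d l).contains "tech" = true := by
  unfold pb_addLine
  split_ifs <;> simp [PySem.Dict.contains_insert, hd]

theorem inner_lemma (ls : List String) (exp : List (List (String × String)))
    (d : PySem.Dict String String) (hd : d.contains "tech" = true) :
    finA (ls.foldl pa_body (exp, d)) =
      exp ++ [((ls.takeWhile pb_notTech).foldl pb_addLine d).items]
          ++ pb_blocks (ls.dropWhile pb_notTech) := by
  induction ls generalizing exp d with
  | nil => simp [finA, pa_flushCond, hd, size_ne_of_contains d hd, pb_blocks]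
  | cons l ls ih =>
    cases h : PySem.Str.startswith l "TECH:" with
    | true =>
      simp only [PySem.Str.startswith_eq,
        show ("TECH:".toList) = ['T','E','C','H',':'] from rfl] at h
      have hstep : pa_body (exp, d) l =
          (exp ++ [d.items],
           PySem.Dict.empty.insert "tech" (PySem.Str.strip (PySem.Str.slice l (some 5) none))) := by
        simp [pa_body, h, pa_flushCond, hd, size_ne_of_contains d hd]
      have hnt : pb_notTech l = false := by simp [pb_notTech, h]
      rw [List.foldl_cons, hstep, ih _ _ (PySem.Dict.contains_insert_self _ _ _)]
      simp [pb_blocks, h, hnt, pb_record]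
    | false =>
      have hs := size_ne_of_contains d hd
      have hb := body_notTech exp d l h hs
      simp only [PySem.Str.startswith_eq,
        show ("TECH:".toList) = ['T','E','C','H',':'] from rfl] at h
      have hnt : pb_notTech l = true := by simp [pb_notTech, h]
      rw [List.foldl_cons, hb, ih _ _ (addLine_contains d l hd)]
      simp [hnt]

theorem outer_lemma (ls : List String) (exp : List (List (String × String))) :
    finA (ls.foldl pa_body (exp, PySem.Dict.empty)) = exp ++ pb_blocks ls := by
  induction ls generalizing exp with
  | nil => simp [finA, pa_flushCond, pb_blocks, PySem.Dict.size_empty]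
  | cons l ls ih =>
    cases h : PySem.Str.startswith l "TECH:" with
    | true =>
      simp only [PySem.Str.startswith_eq,
        show ("TECH:".toList) = ['T','E','C','H',':'] from rfl] at h
      have hstep : pa_body (exp, PySem.Dict.empty) l =
          (exp, PySem.Dict.empty.insert "tech" (PySem.Str.strip (PySem.Str.slice l (some 5) none))) := by
        simp [pa_body, h, pa_flushCond, PySem.Dict.size_empty]
      rw [List.foldl_cons, hstep, inner_lemma ls exp _ (PySem.Dict.contains_insert_self _ _ _)]
      simp [pb_blocks, h, pb_record]
    | false =>
      simp only [PySem.Str.startswith_eq,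
        show ("TECH:".toList) = ['T','E','C','H',':'] from rfl] at h
      have hstep : pa_body (exp, PySem.Dict.empty) l = (exp, PySem.Dict.empty) := by
        simp [pa_body, h, PySem.Dict.size_empty]
      rw [List.foldl_cons, hstep, ih]
      simp [pb_blocks, h]

-- ===== VERDICT (by name: the statement is the Claim_ definition above) =====
theorem parse_expertise_spec : Claim_equal_parse_expertise := by
  intro text _
  show parse_expertise text = parse_expertise_alt text
  have h : parse_expertise text =
      finA ((((PySem.Str.split? text "\n").getD []).map PySem.Str.strip).foldl pa_body ([], PySem.Dict.empty)) := by
    simp [parse_expertise, finA, List.foldl_map]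
  rw [h, outer_lemma]
  rfl
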